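-- pv_equiv track=rewrite | github.com/Saqib12333/ScribeDash | scribedash/ingest.py | pick_current_month_title
-- ===== SOURCE A (Python) =====
-- from typing import Optional, Tuple
--
-- def pick_current_month_title(candidates: list[str]) -> Tuple[str, list[str]]:
--     # Prefer an exact calendar month name, else first candidate
--     month_names = [
--         "January",
--         "February",
--         "March",
--         "April",
--         "May",
--         "June",
--         "July",
--         "August",
--         "September",
--         "October",
--         "November",
--         "December",
--     ]
--     for m in month_names[::-1]:  # prefer later in year if multiple
--         if m in candidates:
--             rest = [c for c in candidates if c != m]
--             return m, rest
--     return candidates[0], candidates[1:]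
-- ===== SOURCE B (Python) =====
-- MONTH_INDEX = {
--     "January": 1, "February": 2, "March": 3, "April": 4,
--     "May": 5, "June": 6, "July": 7, "August": 8,
--     "September": 9, "October": 10, "November": 11, "December": 12,
-- }
--
-- def pick_current_month_title(candidates: list):
--     best = None  # (name, index) of the latest month seen so far
--     for c in candidates:
--         i = MONTH_INDEX.get(c)
--         if i is not None and (best is None or i > best[1]):
--             best = (c, i)
--     if best is not None:
--         m = best[0]
--         return m, [c for c in candidates if c != m]
--     return candidates[0], candidates[1:]
-- ===== Notes on version B (the rewrite author's own statement) =====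
-- stated objective: faster
-- what changed: Replaces the reversed 12-month scan (each month doing a membership test over candidates) by a single pass over candidates with a month->index table, keeping the month of maximal calendar index.
import Mathlib
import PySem

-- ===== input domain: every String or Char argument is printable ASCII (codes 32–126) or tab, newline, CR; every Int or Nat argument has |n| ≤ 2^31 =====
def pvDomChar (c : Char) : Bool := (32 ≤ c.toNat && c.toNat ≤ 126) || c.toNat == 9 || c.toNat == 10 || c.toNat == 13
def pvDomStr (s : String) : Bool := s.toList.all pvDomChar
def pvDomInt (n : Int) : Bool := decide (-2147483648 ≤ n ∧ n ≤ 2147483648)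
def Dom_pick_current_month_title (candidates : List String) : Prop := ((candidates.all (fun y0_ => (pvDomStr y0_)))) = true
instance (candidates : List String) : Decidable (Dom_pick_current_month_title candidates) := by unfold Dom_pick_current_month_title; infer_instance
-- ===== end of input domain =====

-- B replaces A's reversed 12-month scan (a membership test over candidates per month) by a
-- single pass over candidates with a month→index table, keeping the month of maximal index.
-- Equivalence of the RETURN values is proved for nonempty candidate lists (both raise on []).

-- ===== PORT A =====
def month_names : List String := ["January","February","March","April","May","June","July","August","September","October","November","December"]

-- the 'for m in month_names[::-1]' loop ([::-1] = reverse, PySem.List.slice?_none_none_neg_one);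
-- returns some (m, rest) at the first 'return' inside the loop, none if the loop falls through
def pickLoopA (candidates : List String) : List String → Option (String × List String)
  | [] => none
  | m :: ms =>
    if m ∈ candidates then some (m, candidates.filter (fun c => c != m))
    else pickLoopA candidates ms

def pick_current_month_title (candidates : List String) : String × List String :=
  match pickLoopA candidates month_names.reverse with
  | some r => r
  | none =>
    match candidates with
    | [] => ("", [])   -- Python raises IndexError here (candidates[0]); excluded by Pre_
    | h :: t => (h, t)

-- ===== PORT B =====
-- MONTH_INDEX dict literal (successive inserts into the empty dict)
def monthIndex : PySem.Dict String Int :=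
  (((((((((((PySem.Dict.empty.insert "January" (1 : Int)).insert "February" 2).insert "March" 3).insert
      "April" 4).insert "May" 5).insert "June" 6).insert "July" 7).insert "August" 8).insert
      "September" 9).insert "October" 10).insert "November" 11).insert "December" 12

-- one iteration of B's loop: keep the (name, index) with the largest index seen so far
def bestStep (best : Option (String × Int)) (c : String) : Option (String × Int) :=
  match monthIndex.get? c with
  | none => best
  | some i =>
    match best with
    | none => some (c, i)
    | some b => if b.2 < i then some (c, i) else best

def pick_current_month_title_alt (candidates : List String) : String × List String :=
  match candidates.foldl bestStep none with
  | some b => (b.1, candidates.filter (fun c => c != b.1))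
  | none =>
    match candidates with
    | [] => ("", [])   -- Python raises IndexError here (candidates[0]); excluded by Pre_
    | h :: t => (h, t)

-- ===== PRECONDITION & SPEC =====
-- A raises IndexError exactly on the empty list (no month is found and candidates[0] fails).
def Pre_pick_current_month_title (candidates : List String) : Prop := candidates ≠ []
instance (candidates : List String) : Decidable (Pre_pick_current_month_title candidates) := by unfold Pre_pick_current_month_title; infer_instance
def pvWitness_pick_current_month_title : List String := ["notes", "May", "December", "May"]
def Spec_pick_current_month_title (candidates : List String) (out : String × List String) : Prop := out = pick_current_month_title_alt candidates
instance (candidates : List String) (out : String × List String) : Decidable (Spec_pick_current_month_title candidates out) := by unfold Spec_pick_current_month_title; infer_instance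

-- ===== CLAIM (what is proved, stated in full; the proofs are below) =====
def Claim_equal_pick_current_month_title : Prop := ∀ (candidates : List String), Dom_pick_current_month_title candidates → Pre_pick_current_month_title candidates → Spec_pick_current_month_title candidates (pick_current_month_title candidates)

-- ===== LEMMAS AND PROOFS =====

-- any value held by the accumulator is a genuine (month, index) table entry
theorem bestStep_good (acc : Option (String × Int)) (c : String)
    (h : ∀ p, acc = some p → monthIndex.get? p.1 = some p.2) :
    ∀ p, bestStep acc c = some p → monthIndex.get? p.1 = some p.2 := by
  intro p hp
  cases hg : monthIndex.get? c with
  | none => simp only [bestStep, hg] at hp; exact h p hp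
  | some i =>
    cases acc with
    | none => simp only [bestStep, hg] at hp; cases hp; exact hg
    | some b =>
      simp only [bestStep, hg] at hp
      by_cases hlt : b.2 < i
      · rw [if_pos hlt] at hp; cases hp; exact hg
      · rw [if_neg hlt] at hp; exact h p hp

theorem bestStep_none (acc : Option (String × Int)) (c : String)
    (h : bestStep acc c = none) : acc = none ∧ monthIndex.get? c = none := by
  cases hg : monthIndex.get? c with
  | none => simp only [bestStep, hg] at h; exact ⟨h, rfl⟩
  | some i =>
    cases acc with
    | none => simp only [bestStep, hg] at h; cases h
    | some b =>
      simp only [bestStep, hg] at h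
      by_cases hlt : b.2 < i
      · rw [if_pos hlt] at h; cases h
      · rw [if_neg hlt] at h; cases h

theorem bestStep_mem (acc : Option (String × Int)) (c : String) (p : String × Int)
    (h : bestStep acc c = some p) : acc = some p ∨ p.1 = c := by
  cases hg : monthIndex.get? c with
  | none => simp only [bestStep, hg] at h; exact Or.inl h
  | some i =>
    cases acc with
    | none => simp only [bestStep, hg] at h; cases h; exact Or.inr rfl
    | some b =>
      simp only [bestStep, hg] at h
      by_cases hlt : b.2 < i
      · rw [if_pos hlt] at h; cases h; exact Or.inr rfl
      · rw [if_neg hlt] at h; exact Or.inl h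

theorem bestStep_acc_le (acc : Option (String × Int)) (c : String) (q : String × Int)
    (h : acc = some q) : ∃ q', bestStep acc c = some q' ∧ q.2 ≤ q'.2 := by
  subst h
  cases hg : monthIndex.get? c with
  | none => exact ⟨q, by simp only [bestStep, hg], le_refl _⟩
  | some i =>
    by_cases hlt : q.2 < i
    · exact ⟨(c, i), by simp only [bestStep, hg]; rw [if_pos hlt], le_of_lt hlt⟩
    · exact ⟨q, by simp only [bestStep, hg]; rw [if_neg hlt], le_refl _⟩

theorem bestStep_get_le (acc : Option (String × Int)) (c : String) (i : Int)
    (h : monthIndex.get? c = some i) : ∃ q', bestStep acc c = some q' ∧ i ≤ q'.2 := by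
  cases acc with
  | none => exact ⟨(c, i), by simp only [bestStep, h], le_refl _⟩
  | some b =>
    by_cases hlt : b.2 < i
    · exact ⟨(c, i), by simp only [bestStep, h]; rw [if_pos hlt], le_refl _⟩
    · exact ⟨b, by simp only [bestStep, h]; rw [if_neg hlt], le_of_not_gt hlt⟩

theorem fold_good (cs : List String) : ∀ acc, (∀ p, acc = some p → monthIndex.get? p.1 = some p.2) →
    ∀ p, cs.foldl bestStep acc = some p → monthIndex.get? p.1 = some p.2 := by
  induction cs with
  | nil => intro acc h p hp; exact h p hp
  | cons c cs ih =>
    intro acc h p hp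
    simp only [List.foldl_cons] at hp
    exact ih (bestStep acc c) (bestStep_good acc c h) p hp

theorem fold_none (cs : List String) : ∀ acc, cs.foldl bestStep acc = none →
    acc = none ∧ ∀ c ∈ cs, monthIndex.get? c = none := by
  induction cs with
  | nil => intro acc h; exact ⟨h, by intro c hc; cases hc⟩
  | cons c cs ih =>
    intro acc h
    simp only [List.foldl_cons] at h
    obtain ⟨h1, h2⟩ := ih (bestStep acc c) h
    obtain ⟨ha, hg⟩ := bestStep_none acc c h1
    refine ⟨ha, ?_⟩
    intro d hd
    rcases List.mem_cons.mp hd with rfl | hd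
    · exact hg
    · exact h2 d hd

theorem fold_mem (cs : List String) : ∀ acc p, cs.foldl bestStep acc = some p →
    acc = some p ∨ p.1 ∈ cs := by
  induction cs with
  | nil => intro acc p h; exact Or.inl h
  | cons c cs ih =>
    intro acc p h
    simp only [List.foldl_cons] at h
    rcases ih (bestStep acc c) p h with h1 | h1
    · rcases bestStep_mem acc c p h1 with h2 | h2
      · exact Or.inl h2
      · exact Or.inr (h2 ▸ List.mem_cons_self ..)
    · exact Or.inr (List.mem_cons_of_mem _ h1)

theorem fold_max (cs : List String) : ∀ acc p, cs.foldl bestStep acc = some p →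
    (∀ q, acc = some q → q.2 ≤ p.2) ∧ (∀ c ∈ cs, ∀ i, monthIndex.get? c = some i → i ≤ p.2) := by
  induction cs with
  | nil =>
    intro acc p h
    refine ⟨?_, by intro c hc; cases hc⟩
    intro q hq
    rw [hq] at h
    cases h
    exact le_refl _
  | cons c cs ih =>
    intro acc p h
    simp only [List.foldl_cons] at h
    obtain ⟨h1, h2⟩ := ih (bestStep acc c) p h
    constructor
    · intro q hq
      obtain ⟨q', hq', hle⟩ := bestStep_acc_le acc c q hq
      exact le_trans hle (h1 q' hq')
    · intro d hd i hi
      rcases List.mem_cons.mp hd with rfl | hd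
      · obtain ⟨q', hq', hle⟩ := bestStep_get_le acc d i hi
        exact le_trans hle (h1 q' hq')
      · exact h2 d hd i hi

-- the index table, read back: a successful lookup is one of the twelve months
theorem get?_cases (c : String) (i : Int) (h : monthIndex.get? c = some i) :
    (c = "January" ∧ i = 1) ∨ (c = "February" ∧ i = 2) ∨ (c = "March" ∧ i = 3) ∨
    (c = "April" ∧ i = 4) ∨ (c = "May" ∧ i = 5) ∨ (c = "June" ∧ i = 6) ∨
    (c = "July" ∧ i = 7) ∨ (c = "August" ∧ i = 8) ∨ (c = "September" ∧ i = 9) ∨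
    (c = "October" ∧ i = 10) ∨ (c = "November" ∧ i = 11) ∨ (c = "December" ∧ i = 12) := by
  have hk : c ∈ monthIndex.keys := by
    by_contra hc
    rw [(PySem.Dict.get?_eq_none_iff_not_mem_keys _ _).2 hc] at h
    cases h
  have hkeys : monthIndex.keys = ["January","February","March","April","May","June","July","August","September","October","November","December"] := by decide
  rw [hkeys] at hk
  simp only [List.mem_cons, List.not_mem_nil, or_false] at hk
  rcases hk with rfl|rfl|rfl|rfl|rfl|rfl|rfl|rfl|rfl|rfl|rfl|rfl
  · have hv : monthIndex.get? "January" = some 1 := by decide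
    cases hv.symm.trans h
    exact Or.inl ⟨rfl, rfl⟩
  · have hv : monthIndex.get? "February" = some 2 := by decide
    cases hv.symm.trans h
    exact Or.inr (Or.inl ⟨rfl, rfl⟩)
  · have hv : monthIndex.get? "March" = some 3 := by decide
    cases hv.symm.trans h
    exact Or.inr (Or.inr (Or.inl ⟨rfl, rfl⟩))
  · have hv : monthIndex.get? "April" = some 4 := by decide
    cases hv.symm.trans h
    exact Or.inr (Or.inr (Or.inr (Or.inl ⟨rfl, rfl⟩)))
  · have hv : monthIndex.get? "May" = some 5 := by decide
    cases hv.symm.trans h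
    exact Or.inr (Or.inr (Or.inr (Or.inr (Or.inl ⟨rfl, rfl⟩))))
  · have hv : monthIndex.get? "June" = some 6 := by decide
    cases hv.symm.trans h
    exact Or.inr (Or.inr (Or.inr (Or.inr (Or.inr (Or.inl ⟨rfl, rfl⟩)))))
  · have hv : monthIndex.get? "July" = some 7 := by decide
    cases hv.symm.trans h
    exact Or.inr (Or.inr (Or.inr (Or.inr (Or.inr (Or.inr (Or.inl ⟨rfl, rfl⟩))))))
  · have hv : monthIndex.get? "August" = some 8 := by decide
    cases hv.symm.trans h
    exact Or.inr (Or.inr (Or.inr (Or.inr (Or.inr (Or.inr (Or.inr (Or.inl ⟨rfl, rfl⟩)))))))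
  · have hv : monthIndex.get? "September" = some 9 := by decide
    cases hv.symm.trans h
    exact Or.inr (Or.inr (Or.inr (Or.inr (Or.inr (Or.inr (Or.inr (Or.inr (Or.inl ⟨rfl, rfl⟩))))))))
  · have hv : monthIndex.get? "October" = some 10 := by decide
    cases hv.symm.trans h
    exact Or.inr (Or.inr (Or.inr (Or.inr (Or.inr (Or.inr (Or.inr (Or.inr (Or.inr (Or.inl ⟨rfl, rfl⟩)))))))))
  · have hv : monthIndex.get? "November" = some 11 := by decide
    cases hv.symm.trans h
    exact Or.inr (Or.inr (Or.inr (Or.inr (Or.inr (Or.inr (Or.inr (Or.inr (Or.inr (Or.inr (Or.inl ⟨rfl, rfl⟩))))))))))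
  · have hv : monthIndex.get? "December" = some 12 := by decide
    cases hv.symm.trans h
    exact Or.inr (Or.inr (Or.inr (Or.inr (Or.inr (Or.inr (Or.inr (Or.inr (Or.inr (Or.inr (Or.inr (⟨rfl, rfl⟩)))))))))))

-- ===== VERDICT (by name: the statement is the Claim_ definition above) =====
theorem pick_current_month_title_spec : Claim_equal_pick_current_month_title := by
  unfold Claim_equal_pick_current_month_title
  intro cs _ hpre
  unfold Spec_pick_current_month_title
  have hrev : month_names.reverse = ["December","November","October","September","August","July","June","May","April","March","February","January"] := by decide
  cases hff : cs.foldl bestStep none with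
  | none =>
    have hno := (fold_none cs none hff).2
    have hloop : pickLoopA cs ["December","November","October","September","August","July","June","May","April","March","February","January"] = none := by
      have hnm : ∀ k ∈ (["December","November","October","September","August","July","June","May","April","March","February","January"] : List String), k ∉ cs := by
        intro k hk hmem
        have h1 := hno k hmem
        have h2 : monthIndex.contains k = true := by
          fin_cases hk <;> decide
        rw [PySem.Dict.contains_eq_isSome_get?, h1] at h2
        cases h2
      simp [pickLoopA, hnm]
    unfold pick_current_month_title pick_current_month_title_alt
    rw [hrev, hloop, hff]
  | some b =>
    obtain ⟨b1, b2⟩ := b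
    have hgood : monthIndex.get? b1 = some b2 :=
      fold_good cs none (by intro p hp; cases hp) (b1, b2) hff
    have hmem : b1 ∈ cs := by
      rcases fold_mem cs none (b1, b2) hff with h | h
      · cases h
      · exact h
    have hmax : ∀ c ∈ cs, ∀ i, monthIndex.get? c = some i → i ≤ b2 :=
      (fold_max cs none (b1, b2) hff).2
    rcases get?_cases b1 b2 hgood with hc|hc|hc|hc|hc|hc|hc|hc|hc|hc|hc|hc
    · -- b = ("January", 1)
      obtain ⟨rfl, rfl⟩ := hc
      have hn12 : "December" ∉ cs := fun hm => by
        have hle := hmax _ hm 12 (by decide)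
        omega
      have hn11 : "November" ∉ cs := fun hm => by
        have hle := hmax _ hm 11 (by decide)
        omega
      have hn10 : "October" ∉ cs := fun hm => by
        have hle := hmax _ hm 10 (by decide)
        omega
      have hn9 : "September" ∉ cs := fun hm => by
        have hle := hmax _ hm 9 (by decide)
        omega
      have hn8 : "August" ∉ cs := fun hm => by
        have hle := hmax _ hm 8 (by decide)
        omega
      have hn7 : "July" ∉ cs := fun hm => by
        have hle := hmax _ hm 7 (by decide)
        omega
      have hn6 : "June" ∉ cs := fun hm => by
        have hle := hmax _ hm 6 (by decide)
        omega
      have hn5 : "May" ∉ cs := fun hm => by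
        have hle := hmax _ hm 5 (by decide)
        omega
      have hn4 : "April" ∉ cs := fun hm => by
        have hle := hmax _ hm 4 (by decide)
        omega
      have hn3 : "March" ∉ cs := fun hm => by
        have hle := hmax _ hm 3 (by decide)
        omega
      have hn2 : "February" ∉ cs := fun hm => by
        have hle := hmax _ hm 2 (by decide)
        omega
      have hloop : pickLoopA cs ["December","November","October","September","August","July","June","May","April","March","February","January"] = some ("January", cs.filter (fun c => c != "January")) := by
        simp [pickLoopA, hn12, hn11, hn10, hn9, hn8, hn7, hn6, hn5, hn4, hn3, hn2, hmem]
      unfold pick_current_month_title pick_current_month_title_alt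
      rw [hrev, hloop, hff]
    · -- b = ("February", 2)
      obtain ⟨rfl, rfl⟩ := hc
      have hn12 : "December" ∉ cs := fun hm => by
        have hle := hmax _ hm 12 (by decide)
        omega
      have hn11 : "November" ∉ cs := fun hm => by
        have hle := hmax _ hm 11 (by decide)
        omega
      have hn10 : "October" ∉ cs := fun hm => by
        have hle := hmax _ hm 10 (by decide)
        omega
      have hn9 : "September" ∉ cs := fun hm => by
        have hle := hmax _ hm 9 (by decide)
        omega
      have hn8 : "August" ∉ cs := fun hm => by
        have hle := hmax _ hm 8 (by decide)
        omega
      have hn7 : "July" ∉ cs := fun hm => by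
        have hle := hmax _ hm 7 (by decide)
        omega
      have hn6 : "June" ∉ cs := fun hm => by
        have hle := hmax _ hm 6 (by decide)
        omega
      have hn5 : "May" ∉ cs := fun hm => by
        have hle := hmax _ hm 5 (by decide)
        omega
      have hn4 : "April" ∉ cs := fun hm => by
        have hle := hmax _ hm 4 (by decide)
        omega
      have hn3 : "March" ∉ cs := fun hm => by
        have hle := hmax _ hm 3 (by decide)
        omega
      have hloop : pickLoopA cs ["December","November","October","September","August","July","June","May","April","March","February","January"] = some ("February", cs.filter (fun c => c != "February")) := by
        simp [pickLoopA, hn12, hn11, hn10, hn9, hn8, hn7, hn6, hn5, hn4, hn3, hmem]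
      unfold pick_current_month_title pick_current_month_title_alt
      rw [hrev, hloop, hff]
    · -- b = ("March", 3)
      obtain ⟨rfl, rfl⟩ := hc
      have hn12 : "December" ∉ cs := fun hm => by
        have hle := hmax _ hm 12 (by decide)
        omega
      have hn11 : "November" ∉ cs := fun hm => by
        have hle := hmax _ hm 11 (by decide)
        omega
      have hn10 : "October" ∉ cs := fun hm => by
        have hle := hmax _ hm 10 (by decide)
        omega
      have hn9 : "September" ∉ cs := fun hm => by
        have hle := hmax _ hm 9 (by decide)
        omega
      have hn8 : "August" ∉ cs := fun hm => by
        have hle := hmax _ hm 8 (by decide)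
        omega
      have hn7 : "July" ∉ cs := fun hm => by
        have hle := hmax _ hm 7 (by decide)
        omega
      have hn6 : "June" ∉ cs := fun hm => by
        have hle := hmax _ hm 6 (by decide)
        omega
      have hn5 : "May" ∉ cs := fun hm => by
        have hle := hmax _ hm 5 (by decide)
        omega
      have hn4 : "April" ∉ cs := fun hm => by
        have hle := hmax _ hm 4 (by decide)
        omega
      have hloop : pickLoopA cs ["December","November","October","September","August","July","June","May","April","March","February","January"] = some ("March", cs.filter (fun c => c != "March")) := by
        simp [pickLoopA, hn12, hn11, hn10, hn9, hn8, hn7, hn6, hn5, hn4, hmem]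
      unfold pick_current_month_title pick_current_month_title_alt
      rw [hrev, hloop, hff]
    · -- b = ("April", 4)
      obtain ⟨rfl, rfl⟩ := hc
      have hn12 : "December" ∉ cs := fun hm => by
        have hle := hmax _ hm 12 (by decide)
        omega
      have hn11 : "November" ∉ cs := fun hm => by
        have hle := hmax _ hm 11 (by decide)
        omega
      have hn10 : "October" ∉ cs := fun hm => by
        have hle := hmax _ hm 10 (by decide)
        omega
      have hn9 : "September" ∉ cs := fun hm => by
        have hle := hmax _ hm 9 (by decide)
        omega
      have hn8 : "August" ∉ cs := fun hm => by
        have hle := hmax _ hm 8 (by decide)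
        omega
      have hn7 : "July" ∉ cs := fun hm => by
        have hle := hmax _ hm 7 (by decide)
        omega
      have hn6 : "June" ∉ cs := fun hm => by
        have hle := hmax _ hm 6 (by decide)
        omega
      have hn5 : "May" ∉ cs := fun hm => by
        have hle := hmax _ hm 5 (by decide)
        omega
      have hloop : pickLoopA cs ["December","November","October","September","August","July","June","May","April","March","February","January"] = some ("April", cs.filter (fun c => c != "April")) := by
        simp [pickLoopA, hn12, hn11, hn10, hn9, hn8, hn7, hn6, hn5, hmem]
      unfold pick_current_month_title pick_current_month_title_alt
      rw [hrev, hloop, hff]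
    · -- b = ("May", 5)
      obtain ⟨rfl, rfl⟩ := hc
      have hn12 : "December" ∉ cs := fun hm => by
        have hle := hmax _ hm 12 (by decide)
        omega
      have hn11 : "November" ∉ cs := fun hm => by
        have hle := hmax _ hm 11 (by decide)
        omega
      have hn10 : "October" ∉ cs := fun hm => by
        have hle := hmax _ hm 10 (by decide)
        omega
      have hn9 : "September" ∉ cs := fun hm => by
        have hle := hmax _ hm 9 (by decide)
        omega
      have hn8 : "August" ∉ cs := fun hm => by
        have hle := hmax _ hm 8 (by decide)
        omega
      have hn7 : "July" ∉ cs := fun hm => by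
        have hle := hmax _ hm 7 (by decide)
        omega
      have hn6 : "June" ∉ cs := fun hm => by
        have hle := hmax _ hm 6 (by decide)
        omega
      have hloop : pickLoopA cs ["December","November","October","September","August","July","June","May","April","March","February","January"] = some ("May", cs.filter (fun c => c != "May")) := by
        simp [pickLoopA, hn12, hn11, hn10, hn9, hn8, hn7, hn6, hmem]
      unfold pick_current_month_title pick_current_month_title_alt
      rw [hrev, hloop, hff]
    · -- b = ("June", 6)
      obtain ⟨rfl, rfl⟩ := hc
      have hn12 : "December" ∉ cs := fun hm => by
        have hle := hmax _ hm 12 (by decide)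
        omega
      have hn11 : "November" ∉ cs := fun hm => by
        have hle := hmax _ hm 11 (by decide)
        omega
      have hn10 : "October" ∉ cs := fun hm => by
        have hle := hmax _ hm 10 (by decide)
        omega
      have hn9 : "September" ∉ cs := fun hm => by
        have hle := hmax _ hm 9 (by decide)
        omega
      have hn8 : "August" ∉ cs := fun hm => by
        have hle := hmax _ hm 8 (by decide)
        omega
      have hn7 : "July" ∉ cs := fun hm => by
        have hle := hmax _ hm 7 (by decide)
        omega
      have hloop : pickLoopA cs ["December","November","October","September","August","July","June","May","April","March","February","January"] = some ("June", cs.filter (fun c => c != "June")) := by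
        simp [pickLoopA, hn12, hn11, hn10, hn9, hn8, hn7, hmem]
      unfold pick_current_month_title pick_current_month_title_alt
      rw [hrev, hloop, hff]
    · -- b = ("July", 7)
      obtain ⟨rfl, rfl⟩ := hc
      have hn12 : "December" ∉ cs := fun hm => by
        have hle := hmax _ hm 12 (by decide)
        omega
      have hn11 : "November" ∉ cs := fun hm => by
        have hle := hmax _ hm 11 (by decide)
        omega
      have hn10 : "October" ∉ cs := fun hm => by
        have hle := hmax _ hm 10 (by decide)
        omega
      have hn9 : "September" ∉ cs := fun hm => by
        have hle := hmax _ hm 9 (by decide)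
        omega
      have hn8 : "August" ∉ cs := fun hm => by
        have hle := hmax _ hm 8 (by decide)
        omega
      have hloop : pickLoopA cs ["December","November","October","September","August","July","June","May","April","March","February","January"] = some ("July", cs.filter (fun c => c != "July")) := by
        simp [pickLoopA, hn12, hn11, hn10, hn9, hn8, hmem]
      unfold pick_current_month_title pick_current_month_title_alt
      rw [hrev, hloop, hff]
    · -- b = ("August", 8)
      obtain ⟨rfl, rfl⟩ := hc
      have hn12 : "December" ∉ cs := fun hm => by
        have hle := hmax _ hm 12 (by decide)
        omega
      have hn11 : "November" ∉ cs := fun hm => by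
        have hle := hmax _ hm 11 (by decide)
        omega
      have hn10 : "October" ∉ cs := fun hm => by
        have hle := hmax _ hm 10 (by decide)
        omega
      have hn9 : "September" ∉ cs := fun hm => by
        have hle := hmax _ hm 9 (by decide)
        omega
      have hloop : pickLoopA cs ["December","November","October","September","August","July","June","May","April","March","February","January"] = some ("August", cs.filter (fun c => c != "August")) := by
        simp [pickLoopA, hn12, hn11, hn10, hn9, hmem]
      unfold pick_current_month_title pick_current_month_title_alt
      rw [hrev, hloop, hff]
    · -- b = ("September", 9)
      obtain ⟨rfl, rfl⟩ := hc
      have hn12 : "December" ∉ cs := fun hm => by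
        have hle := hmax _ hm 12 (by decide)
        omega
      have hn11 : "November" ∉ cs := fun hm => by
        have hle := hmax _ hm 11 (by decide)
        omega
      have hn10 : "October" ∉ cs := fun hm => by
        have hle := hmax _ hm 10 (by decide)
        omega
      have hloop : pickLoopA cs ["December","November","October","September","August","July","June","May","April","March","February","January"] = some ("September", cs.filter (fun c => c != "September")) := by
        simp [pickLoopA, hn12, hn11, hn10, hmem]
      unfold pick_current_month_title pick_current_month_title_alt
      rw [hrev, hloop, hff]
    · -- b = ("October", 10)
      obtain ⟨rfl, rfl⟩ := hc
      have hn12 : "December" ∉ cs := fun hm => by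
        have hle := hmax _ hm 12 (by decide)
        omega
      have hn11 : "November" ∉ cs := fun hm => by
        have hle := hmax _ hm 11 (by decide)
        omega
      have hloop : pickLoopA cs ["December","November","October","September","August","July","June","May","April","March","February","January"] = some ("October", cs.filter (fun c => c != "October")) := by
        simp [pickLoopA, hn12, hn11, hmem]
      unfold pick_current_month_title pick_current_month_title_alt
      rw [hrev, hloop, hff]
    · -- b = ("November", 11)
      obtain ⟨rfl, rfl⟩ := hc
      have hn12 : "December" ∉ cs := fun hm => by
        have hle := hmax _ hm 12 (by decide)
        omega
      have hloop : pickLoopA cs ["December","November","October","September","August","July","June","May","April","March","February","January"] = some ("November", cs.filter (fun c => c != "November")) := by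
        simp [pickLoopA, hn12, hmem]
      unfold pick_current_month_title pick_current_month_title_alt
      rw [hrev, hloop, hff]
    · -- b = ("December", 12)
      obtain ⟨rfl, rfl⟩ := hc
      have hloop : pickLoopA cs ["December","November","October","September","August","July","June","May","April","March","February","January"] = some ("December", cs.filter (fun c => c != "December")) := by
        simp [pickLoopA, hmem]
      unfold pick_current_month_title pick_current_month_title_alt
      rw [hrev, hloop, hff]
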